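-- pv_equiv track=rewrite | github.com/manudelp/xlsxworld | server/app/tools/convert/xlsx_to_xml.py | _normalize_sheet_selection
-- ===== SOURCE A (Python) =====
-- def _normalize_sheet_selection(sheets: list[str] | None) -> list[str] | None:
--     if not sheets:
--         return None
--     normalized: list[str] = []
--     for entry in sheets:
--         for part in entry.split(","):
--             value = part.strip()
--             if value:
--                 normalized.append(value)
--     return normalized or None
-- ===== SOURCE B (Python) =====
-- def _normalize_sheet_selection(sheets):
--     if not sheets:
--         return None
--     # Single character-level scan: no split()/strip() calls at all.  A comma
--     # flushes the current token; whitespace is buffered in `pending` and only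
--     # committed when a later non-space character arrives, so every flushed
--     # token is already stripped.
--     normalized = []
--     for entry in sheets:
--         token = []
--         pending = []
--         for ch in entry + ",":
--             if ch == ",":
--                 if token:
--                     normalized.append("".join(token))
--                 token = []
--                 pending = []
--             elif ch.isspace():
--                 if token:
--                     pending.append(ch)
--             else:
--                 token += pending
--                 pending = []
--                 token.append(ch)
--     return normalized or None
-- ===== Notes on version B (the rewrite author's own statement) =====
-- stated objective: alternative
-- what changed: B replaces A's split()/strip() pipeline with a single character-level scanner: it walks each entry's characters once, buffering trailing whitespace in a pending list and flushing the current token on every comma, so tokens come out already stripped without ever calling split or strip.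
import Mathlib
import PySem

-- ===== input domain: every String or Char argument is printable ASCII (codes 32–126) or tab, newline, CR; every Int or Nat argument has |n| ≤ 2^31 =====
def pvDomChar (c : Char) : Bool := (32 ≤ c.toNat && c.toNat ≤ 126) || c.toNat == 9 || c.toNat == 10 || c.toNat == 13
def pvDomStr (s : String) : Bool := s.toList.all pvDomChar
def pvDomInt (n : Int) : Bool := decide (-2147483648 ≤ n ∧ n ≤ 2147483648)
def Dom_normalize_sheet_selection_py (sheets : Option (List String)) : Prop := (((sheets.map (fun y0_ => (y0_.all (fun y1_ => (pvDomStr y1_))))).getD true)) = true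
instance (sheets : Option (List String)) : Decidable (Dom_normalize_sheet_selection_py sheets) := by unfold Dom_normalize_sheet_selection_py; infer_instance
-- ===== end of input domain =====

-- B replaces A's split()/strip() pipeline with a single character-level scanner (comma flushes the token, whitespace is buffered and committed lazily), an alternative algorithm of the same cost.

-- ===== PORT A =====
def normalize_sheet_selection_py (sheets : Option (List String)) : Option (List String) :=
  match sheets with
  | none => none
  | some l =>
    if l.isEmpty then none     -- 'if not sheets: return None'
    else
      let normalized := l.foldl (fun acc entry =>
        ((PySem.Str.split? entry ",").getD []).foldl
          (fun acc2 part =>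
            let value := PySem.Str.strip part
            if value ≠ "" then acc2 ++ [value] else acc2) acc) []
      if normalized.isEmpty then none else some normalized   -- 'return normalized or None'

-- ===== PORT B =====
-- B's inner loop body: state (normalized, token, pending), one character at a time
def tokStep (st : List String × List Char × List Char) (ch : Char) : List String × List Char × List Char :=
  if ch = ',' then
    (if st.2.1 ≠ [] then st.1 ++ [String.ofList st.2.1] else st.1, [], [])   -- flush: 'if token: normalized.append("".join(token))'
  else if PySem.Chars.isspace ch then
    (st.1, st.2.1, if st.2.1 ≠ [] then st.2.2 ++ [ch] else st.2.2)          -- 'if token: pending.append(ch)'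
  else
    (st.1, st.2.1 ++ st.2.2 ++ [ch], [])                                    -- 'token += pending; pending = []; token.append(ch)'

def normalize_sheet_selection_py_alt (sheets : Option (List String)) : Option (List String) :=
  match sheets with
  | none => none
  | some l =>
    if l.isEmpty then none     -- 'if not sheets: return None'
    else
      let normalized := l.foldl (fun norm entry =>
        -- 'for ch in entry + ",":' — iteration over code points; exact
        ((entry.toList ++ [',']).foldl tokStep (norm, [], [])).1) []
      if normalized.isEmpty then none else some normalized   -- 'return normalized or None'

-- ===== PRECONDITION & SPEC =====
def Spec_normalize_sheet_selection_py (sheets : Option (List String)) (out : Option (List String)) : Prop := out = normalize_sheet_selection_py_alt sheets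
instance (sheets : Option (List String)) (out : Option (List String)) : Decidable (Spec_normalize_sheet_selection_py sheets out) := by unfold Spec_normalize_sheet_selection_py; infer_instance

-- ===== CLAIM (what is proved, stated in full; the proofs are below) =====
def Claim_equal_normalize_sheet_selection_py : Prop := ∀ (sheets : Option (List String)), Dom_normalize_sheet_selection_py sheets → Spec_normalize_sheet_selection_py sheets (normalize_sheet_selection_py sheets)

-- ===== LEMMAS AND PROOFS =====

theorem modifyHead_fun_id {α : Type} (l : List α) : l.modifyHead (fun x => x) = l := by
  cases l <;> rfl

-- a simple structural recursion equal to PySem.Chars.splitOn · [',']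
def splitC : List Char → List (List Char)
  | [] => [[]]
  | c :: rest =>
    if c = ',' then [] :: splitC rest
    else match splitC rest with
      | [] => [[c]]
      | r :: rs => (c :: r) :: rs

theorem splitC_ne_nil (cs : List Char) : splitC cs ≠ [] := by
  cases cs with
  | nil => simp [splitC]
  | cons c rest =>
    simp only [splitC]
    split_ifs
    · simp
    · cases h : splitC rest <;> simp

theorem splitOn_go_eq (fuel : Nat) : ∀ (cs cur : List Char) (accs : List (List Char)),
    cs.length < fuel →
    PySem.Chars.splitOn.go [','] fuel cs cur accs = accs.reverse ++ (splitC cs).modifyHead (cur.reverse ++ ·) := by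
  induction fuel with
  | zero => intro cs cur accs h; omega
  | succ fuel ih =>
    intro cs cur accs h
    cases cs with
    | nil => simp [PySem.Chars.splitOn.go, splitC]
    | cons c rest =>
      by_cases hc : c = ','
      · subst hc
        rw [show PySem.Chars.splitOn.go [','] (fuel+1) (',' :: rest) cur accs
              = PySem.Chars.splitOn.go [','] fuel rest [] (cur.reverse :: accs) by
            simp [PySem.Chars.splitOn.go, List.isPrefixOf]]
        rw [ih rest [] (cur.reverse :: accs) (by simpa using Nat.lt_of_succ_lt_succ h)]
        simp [splitC, modifyHead_fun_id]
      · rw [show PySem.Chars.splitOn.go [','] (fuel+1) (c :: rest) cur accs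
              = PySem.Chars.splitOn.go [','] fuel rest (c :: cur) accs by
            have hc' : ¬(',' = c) := fun hh => hc hh.symm
            simp [PySem.Chars.splitOn.go, List.isPrefixOf, hc']]
        rw [ih rest (c :: cur) accs (by simpa using Nat.lt_of_succ_lt_succ h)]
        simp only [splitC, if_neg hc]
        obtain ⟨r, rs, hr⟩ : ∃ r rs, splitC rest = r :: rs := by
          cases hsc : splitC rest with
          | nil => exact absurd hsc (splitC_ne_nil rest)
          | cons r rs => exact ⟨r, rs, rfl⟩
        rw [hr]
        simp

theorem splitOn_eq_splitC (cs : List Char) : PySem.Chars.splitOn cs [','] = splitC cs := by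
  rw [PySem.Chars.splitOn, splitOn_go_eq (cs.length + 1) cs [] [] (by omega)]
  simp [modifyHead_fun_id]

theorem split_comma (s : String) :
    (PySem.Str.split? s ",").getD [] = (splitC s.toList).map String.ofList := by
  simp [PySem.Str.split?, PySem.Chars.split?, splitOn_eq_splitC]

theorem inner_foldl (parts : List String) (acc : List String) :
    parts.foldl (fun acc2 part =>
        let value := PySem.Str.strip part
        if value ≠ "" then acc2 ++ [value] else acc2) acc
      = acc ++ (parts.map PySem.Str.strip).filter (fun v => v ≠ "") := by
  induction parts generalizing acc with
  | nil => simp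
  | cons p ps ih => simp only [List.foldl_cons, List.map_cons, List.filter_cons, ih]; by_cases h : PySem.Str.strip p = "" <;> simp [h]

theorem outer_foldl (l : List String) (acc : List String) :
    l.foldl (fun acc entry =>
        ((PySem.Str.split? entry ",").getD []).foldl
          (fun acc2 part =>
            let value := PySem.Str.strip part
            if value ≠ "" then acc2 ++ [value] else acc2) acc) acc
      = acc ++ l.flatMap (fun e => ((((PySem.Str.split? e ",").getD []).map PySem.Str.strip).filter (fun v => v ≠ ""))) := by
  induction l generalizing acc with
  | nil => simp
  | cons e es ih => rw [List.foldl_cons, inner_foldl, ih, List.flatMap_cons, List.append_assoc]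

-- ---- B-side tokenizer characterisation ----

theorem rstrip_all_space (p : List Char) (hp : p.all PySem.Chars.isspace) :
    PySem.Chars.rstrip p = [] := by
  unfold PySem.Chars.rstrip
  have : p.reverse.dropWhile PySem.Chars.isspace = [] := by
    rw [List.dropWhile_eq_nil_iff]
    intro x hx
    exact (List.all_eq_true.mp hp) x (List.mem_reverse.mp hx)
  simp [this]

theorem rstrip_append_cons (u v : List Char) (c : Char) (hc : PySem.Chars.isspace c = false) :
    PySem.Chars.rstrip (u ++ c :: v) = u ++ [c] ++ PySem.Chars.rstrip v := by
  unfold PySem.Chars.rstrip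
  rw [show (u ++ c :: v).reverse = v.reverse ++ (c :: u.reverse) by simp,
      List.dropWhile_append]
  by_cases h : (v.reverse.dropWhile PySem.Chars.isspace).isEmpty
  · simp [hc, List.isEmpty_iff.mp h]
  · rw [if_neg h]
    simp

theorem strip_cons_space (c : Char) (r : List Char) (hc : PySem.Chars.isspace c = true) :
    PySem.Chars.strip (c :: r) = PySem.Chars.strip r := by
  unfold PySem.Chars.strip PySem.Chars.lstrip
  simp [hc]

theorem strip_cons_nonspace (c : Char) (r : List Char) (hc : PySem.Chars.isspace c = false) :
    PySem.Chars.strip (c :: r) = c :: PySem.Chars.rstrip r := by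
  unfold PySem.Chars.strip PySem.Chars.lstrip
  rw [List.dropWhile_cons, hc]
  simpa using rstrip_append_cons [] r c hc

-- the per-entry tokens B must produce (char level)
def tokensOf (cs : List Char) : List String :=
  (((splitC cs).map PySem.Chars.strip).filter (fun w => w ≠ [])).map String.ofList

-- the heart: one pass of tokStep over cs ++ [','] produces exactly the non-empty stripped comma-segments of cs
theorem tokStep_run (cs : List Char) :
    (∀ (norm : List String) (t p : List Char), t ≠ [] → p.all PySem.Chars.isspace →
      ((cs ++ [',']).foldl tokStep (norm, t, p)).1
        = norm ++ [String.ofList (t ++ PySem.Chars.rstrip (p ++ (splitC cs).headI))]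
            ++ ((((splitC cs).tail.map PySem.Chars.strip).filter (fun w => w ≠ [])).map String.ofList)) ∧
    (∀ (norm : List String),
      ((cs ++ [',']).foldl tokStep (norm, [], [])).1 = norm ++ tokensOf cs) := by
  induction cs with
  | nil =>
    constructor
    · intro norm t p ht hp
      simp [tokStep, ht, splitC, rstrip_all_space p hp]
    · intro norm
      simp [tokStep, splitC, tokensOf, PySem.Chars.strip, PySem.Chars.lstrip, PySem.Chars.rstrip]
  | cons c cs ih =>
    obtain ⟨r, rs, hr⟩ : ∃ r rs, splitC cs = r :: rs := by
      cases hsc : splitC cs with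
      | nil => exact absurd hsc (splitC_ne_nil cs)
      | cons r rs => exact ⟨r, rs, rfl⟩
    constructor
    · intro norm t p ht hp
      by_cases hc : c = ','
      · subst hc
        rw [List.cons_append, List.foldl_cons,
            show tokStep (norm, t, p) ',' = (norm ++ [String.ofList t], [], []) by simp [tokStep, ht],
            ih.2 (norm ++ [String.ofList t])]
        simp [splitC, tokensOf, rstrip_all_space p hp]
      · by_cases hs : PySem.Chars.isspace c
        · rw [List.cons_append, List.foldl_cons,
              show tokStep (norm, t, p) c = (norm, t, p ++ [c]) by simp [tokStep, hc, hs, ht],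
              ih.1 norm t (p ++ [c]) ht (by simp [List.all_append, hp, hs])]
          simp only [splitC, if_neg hc, hr, List.headI, List.tail]
          simp
        · rw [List.cons_append, List.foldl_cons,
              show tokStep (norm, t, p) c = (norm, t ++ p ++ [c], []) by simp [tokStep, hc, hs],
              ih.1 norm (t ++ p ++ [c]) [] (by simp) (by simp)]
          simp only [splitC, if_neg hc, hr, List.headI, List.tail]
          rw [show p ++ c :: r = p ++ c :: r by rfl]
          have : PySem.Chars.rstrip (p ++ c :: r) = p ++ [c] ++ PySem.Chars.rstrip r :=
            rstrip_append_cons p r c (by simpa using hs)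
          simp [this]
    · intro norm
      by_cases hc : c = ','
      · subst hc
        rw [List.cons_append, List.foldl_cons,
            show tokStep (norm, [], []) ',' = (norm, [], []) by simp [tokStep],
            ih.2 norm]
        simp [splitC, tokensOf, PySem.Chars.strip, PySem.Chars.lstrip, PySem.Chars.rstrip]
      · by_cases hs : PySem.Chars.isspace c
        · rw [List.cons_append, List.foldl_cons,
              show tokStep (norm, [], []) c = (norm, [], []) by simp [tokStep, hc, hs],
              ih.2 norm]
          simp only [tokensOf, splitC, if_neg hc, hr]
          rw [List.map_cons, List.map_cons, strip_cons_space c r hs]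
        · rw [List.cons_append, List.foldl_cons,
              show tokStep (norm, [], []) c = (norm, [c], []) by simp [tokStep, hc, hs],
              ih.1 norm [c] [] (by simp) (by simp)]
          simp only [tokensOf, splitC, if_neg hc, hr, List.headI, List.tail]
          rw [List.map_cons, List.filter_cons, strip_cons_nonspace c r (by simpa using hs)]
          simp

-- B's outer loop flattens the per-entry tokens
theorem outer_alt (l : List String) (acc : List String) :
    l.foldl (fun norm entry => ((entry.toList ++ [',']).foldl tokStep (norm, [], [])).1) acc
      = acc ++ l.flatMap (fun e => tokensOf e.toList) := by
  induction l generalizing acc with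
  | nil => simp
  | cons e es ih =>
    rw [List.foldl_cons, (tokStep_run e.toList).2 acc, ih, List.flatMap_cons, List.append_assoc]

-- A's per-entry value equals B's per-entry tokens
theorem entry_eq (e : String) :
    ((((PySem.Str.split? e ",").getD []).map PySem.Str.strip).filter (fun v => v ≠ ""))
      = tokensOf e.toList := by
  rw [split_comma]
  have hmap : ((splitC e.toList).map String.ofList).map PySem.Str.strip
      = ((splitC e.toList).map PySem.Chars.strip).map String.ofList := by
    simp only [List.map_map]
    refine List.map_congr_left ?_
    intro seg _
    have h1 : (PySem.Str.strip (String.ofList seg)).toList = PySem.Chars.strip seg := by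
      rw [PySem.Str.toList_strip, String.toList_ofList]
    have h2 := congrArg String.ofList h1
    rwa [String.ofList_toList] at h2
  rw [hmap, tokensOf, List.filter_map]
  congr 1
  refine List.filter_congr ?_
  intro w _
  simp [Function.comp]

-- ===== VERDICT (by name: the statement is the Claim_ definition above) =====
theorem normalize_sheet_selection_py_spec : Claim_equal_normalize_sheet_selection_py := by
  intro sheets _
  unfold Spec_normalize_sheet_selection_py normalize_sheet_selection_py normalize_sheet_selection_py_alt
  cases sheets with
  | none => rfl
  | some l =>
    cases hl : l.isEmpty with
    | true => simp [hl]
    | false =>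
      simp only [hl, Bool.false_eq_true, if_false, outer_foldl, outer_alt, List.nil_append]
      have : l.flatMap (fun e => ((((PySem.Str.split? e ",").getD []).map PySem.Str.strip).filter (fun v => v ≠ "")))
          = l.flatMap (fun e => tokensOf e.toList) := by
        refine List.flatMap_congr ?_
        intro e _
        exact entry_eq e
      rw [this]
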